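-- pv_equiv track=rewrite | github.com/ProteinEngineering-PESB2/data_and_info | scripts/build_catalog.py | pick_primary
-- ===== SOURCE A (Python) =====
-- from typing import Dict, List, Optional, Tuple, Any
--
-- def pick_primary(artifacts: List[Dict[str, Any]]) -> int:
--     """
--     Pick the index of the most likely 'primary' artifact in absence of metadata.json.
--     Preference: table.(parquet|csv) > sequences.fasta > anything else.
--     """
--     for i, a in enumerate(artifacts):
--         if a.get("kind") == "table" and a.get("format") in ("parquet", "csv"):
--             return i
--     for i, a in enumerate(artifacts):
--         if a.get("kind") == "sequences":
--             return i
--     return 0 if artifacts else -1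
-- ===== SOURCE B (Python) =====
-- def pick_primary(artifacts):
--     """Rank-and-argmin: score each artifact (0=preferred table, 1=sequences, 2=other),
--     then take the first index with minimal rank; fall back to 0 / -1."""
--     def rank(a):
--         if a.get("kind") == "table" and a.get("format") in ("parquet", "csv"):
--             return 0
--         if a.get("kind") == "sequences":
--             return 1
--         return 2
--
--     if not artifacts:
--         return -1
--     best_i, best_r = 0, rank(artifacts[0])
--     for i in range(1, len(artifacts)):
--         r = rank(artifacts[i])
--         if r < best_r:
--             best_i, best_r = i, r
--     return best_i if best_r < 2 else 0
-- ===== Notes on version B (the rewrite author's own statement) =====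
-- stated objective: alternative
-- what changed: A's two staged scans with early returns are replaced by a rank function (0 = parquet/csv table, 1 = sequences, 2 = other) and a single argmin loop keeping the first index of minimal rank, with the 0/-1 fallback applied once at the end.
import Mathlib
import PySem

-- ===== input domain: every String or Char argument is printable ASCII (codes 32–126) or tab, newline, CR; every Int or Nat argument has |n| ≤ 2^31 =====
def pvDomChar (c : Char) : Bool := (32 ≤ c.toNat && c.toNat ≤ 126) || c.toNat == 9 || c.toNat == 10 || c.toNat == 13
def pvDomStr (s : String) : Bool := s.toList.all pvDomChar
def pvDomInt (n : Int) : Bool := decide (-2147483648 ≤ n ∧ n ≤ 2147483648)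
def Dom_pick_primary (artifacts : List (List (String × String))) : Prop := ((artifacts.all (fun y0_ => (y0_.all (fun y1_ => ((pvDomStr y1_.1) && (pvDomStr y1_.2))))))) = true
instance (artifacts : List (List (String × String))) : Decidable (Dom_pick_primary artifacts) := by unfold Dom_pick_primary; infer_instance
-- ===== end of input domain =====

-- B replaces A's two staged scans by a rank function (0/1/2) and a single argmin loop (alternative algorithm, same cost).


-- ===== PORT A =====
-- a.get(k): dict lookup = first match in the association list (exact per the type convention)
def pvGetA (a : List (String × String)) (k : String) : Option String :=
  (a.find? (fun p => p.1 == k)).map (fun p => p.2)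

def pickA_loop1 (i : Int) : List (List (String × String)) → Option Int
  | [] => none
  | a :: rest =>
    if pvGetA a "kind" == some "table" &&
       (pvGetA a "format" == some "parquet" || pvGetA a "format" == some "csv") then some i
    else pickA_loop1 (i + 1) rest

def pickA_loop2 (i : Int) : List (List (String × String)) → Option Int
  | [] => none
  | a :: rest =>
    if pvGetA a "kind" == some "sequences" then some i
    else pickA_loop2 (i + 1) rest

def pick_primary (artifacts : List (List (String × String))) : Int :=
  match pickA_loop1 0 artifacts with
  | some i => i
  | none =>
    match pickA_loop2 0 artifacts with
    | some i => i
    | none => if artifacts.isEmpty then -1 else 0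

-- ===== PORT B =====
def pvGetB (a : List (String × String)) (k : String) : Option String :=
  (a.find? (fun p => p.1 == k)).map (fun p => p.2)

-- rank: 0 = preferred table, 1 = sequences, 2 = other
def rankB (a : List (String × String)) : Nat :=
  if pvGetB a "kind" == some "table" &&
     (pvGetB a "format" == some "parquet" || pvGetB a "format" == some "csv") then 0
  else if pvGetB a "kind" == some "sequences" then 1
  else 2

-- argmin loop: keeps (best index, best rank), strict '<' keeps the FIRST minimal index
def pickB_loop (i bestI : Int) (bestR : Nat) : List (List (String × String)) → Int × Nat
  | [] => (bestI, bestR)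
  | a :: rest =>
    let r := rankB a
    if r < bestR then pickB_loop (i + 1) i r rest
    else pickB_loop (i + 1) bestI bestR rest

def pick_primary_alt (artifacts : List (List (String × String))) : Int :=
  match artifacts with
  | [] => -1
  | a :: rest =>
    let p := pickB_loop 1 0 (rankB a) rest
    if p.2 < 2 then p.1 else 0

-- ===== PRECONDITION & SPEC =====
def Spec_pick_primary (artifacts : List (List (String × String))) (out : Int) : Prop := out = pick_primary_alt artifacts
instance (artifacts : List (List (String × String))) (out : Int) : Decidable (Spec_pick_primary artifacts out) := by unfold Spec_pick_primary; infer_instance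

-- ===== CLAIM =====
def Claim_equal_pick_primary : Prop := ∀ (artifacts : List (List (String × String))), Dom_pick_primary artifacts → Spec_pick_primary artifacts (pick_primary artifacts)

-- ===== LEMMAS AND PROOFS =====
theorem pvGet_eq (a : List (String × String)) (k : String) : pvGetB a k = pvGetA a k := rfl

theorem pickB_loop_r0 (rest : List (List (String × String))) :
    ∀ (i bI : Int), pickB_loop i bI 0 rest = (bI, 0) := by
  induction rest with
  | nil => intro i bI; rfl
  | cons a rest ih => intro i bI; simp [pickB_loop, ih]

theorem pickB_loop_r1 (rest : List (List (String × String))) :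
    ∀ (i bI : Int), pickB_loop i bI 1 rest =
      match pickA_loop1 i rest with
      | some v => (v, 0)
      | none => (bI, 1) := by
  induction rest with
  | nil => intro i bI; rfl
  | cons a rest ih =>
    intro i bI
    simp only [pickB_loop, pickA_loop1]
    by_cases ht : (pvGetA a "kind" == some "table" &&
        (pvGetA a "format" == some "parquet" || pvGetA a "format" == some "csv")) = true
    · have : rankB a = 0 := by simp [rankB, pvGet_eq, ht]
      simp [this, pickB_loop_r0, ht]
    · have hr : ¬ rankB a < 1 := by
        simp only [rankB, pvGet_eq]
        rw [if_neg ht]; split <;> omega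
      rw [if_neg hr, if_neg ht, ih]

theorem pickB_loop_r2 (rest : List (List (String × String))) :
    ∀ (i bI : Int), pickB_loop i bI 2 rest =
      match pickA_loop1 i rest with
      | some v => (v, 0)
      | none =>
        match pickA_loop2 i rest with
        | some v => (v, 1)
        | none => (bI, 2) := by
  induction rest with
  | nil => intro i bI; rfl
  | cons a rest ih =>
    intro i bI
    simp only [pickB_loop, pickA_loop1, pickA_loop2]
    by_cases ht : (pvGetA a "kind" == some "table" &&
        (pvGetA a "format" == some "parquet" || pvGetA a "format" == some "csv")) = true
    · have : rankB a = 0 := by simp [rankB, pvGet_eq, ht]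
      simp [this, pickB_loop_r0, ht]
    · by_cases hs : (pvGetA a "kind" == some "sequences") = true
      · have : rankB a = 1 := by simp [rankB, pvGet_eq, ht, hs]
        rw [if_neg ht, if_pos hs]
        simp only [this]
        rw [if_pos (by omega : (1:Nat) < 2), pickB_loop_r1]
      · have : rankB a = 2 := by simp [rankB, pvGet_eq, ht, hs]
        rw [if_neg ht, if_neg hs]
        simp only [this]
        rw [if_neg (by omega : ¬ (2:Nat) < 2), ih]

-- ===== VERDICT =====
theorem pick_primary_spec : Claim_equal_pick_primary := by
  intro artifacts _
  unfold Spec_pick_primary pick_primary pick_primary_alt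
  cases artifacts with
  | nil => rfl
  | cons a rest =>
    simp only [pickA_loop1, pickA_loop2]
    by_cases ht : (pvGetA a "kind" == some "table" &&
        (pvGetA a "format" == some "parquet" || pvGetA a "format" == some "csv")) = true
    · have : rankB a = 0 := by simp [rankB, pvGet_eq, ht]
      simp [this, pickB_loop_r0, ht]
    · by_cases hs : (pvGetA a "kind" == some "sequences") = true
      · have : rankB a = 1 := by simp [rankB, pvGet_eq, ht, hs]
        rw [if_neg ht, if_pos hs]
        simp only [this, pickB_loop_r1]
        cases h1 : pickA_loop1 1 rest <;> simp [h1]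
      · have : rankB a = 2 := by simp [rankB, pvGet_eq, ht, hs]
        rw [if_neg ht, if_neg hs]
        simp only [this, pickB_loop_r2]
        cases h1 : pickA_loop1 1 rest
        · cases h2 : pickA_loop2 1 rest <;> simp [h1, h2]
        · simp [h1]
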